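-- pv_equiv track=rewrite | github.com/zast57/ZastTranslate | modules/reformulator.py | _language_name
-- ===== SOURCE A (Python) =====
-- def _language_name(lang_code):
--     """Convert language code to human-readable name."""
--     name_map = {
--         "fra": "French", "eng": "English", "spa": "Spanish",
--         "deu": "German", "ita": "Italian", "por": "Portuguese",
--         "jpn": "Japanese", "kor": "Korean", "zho": "Chinese",
--         "rus": "Russian", "fr": "French", "en": "English",
--         "es": "Spanish", "de": "German", "it": "Italian",
--         "pt": "Portuguese", "ja": "Japanese", "ko": "Korean",
--         "zh": "Chinese", "ru": "Russian",
--     }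
--     for prefix, name in name_map.items():
--         if lang_code.startswith(prefix):
--             return name
--     return "French"
-- ===== SOURCE B (Python) =====
-- _NAMES3 = {
--     "fra": "French", "eng": "English", "spa": "Spanish",
--     "deu": "German", "ita": "Italian", "por": "Portuguese",
--     "jpn": "Japanese", "kor": "Korean", "zho": "Chinese",
--     "rus": "Russian",
-- }
-- _NAMES2 = {
--     "fr": "French", "en": "English", "es": "Spanish",
--     "de": "German", "it": "Italian", "pt": "Portuguese",
--     "ja": "Japanese", "ko": "Korean", "zh": "Chinese",
--     "ru": "Russian",
-- }
--
-- def _language_name(lang_code):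
--     """Convert language code to human-readable name."""
--     name = _NAMES3.get(lang_code[:3])
--     if name is not None:
--         return name
--     name = _NAMES2.get(lang_code[:2])
--     if name is not None:
--         return name
--     return "French"
-- ===== Notes on version B (the rewrite author's own statement) =====
-- stated objective: idiomatic
-- what changed: Replaces the linear startswith-scan over a 20-entry dict by two direct slice-keyed table lookups (lang_code[:3] in a 3-letter map, then lang_code[:2] in a 2-letter map), with 'French' as the default.
import Mathlib
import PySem

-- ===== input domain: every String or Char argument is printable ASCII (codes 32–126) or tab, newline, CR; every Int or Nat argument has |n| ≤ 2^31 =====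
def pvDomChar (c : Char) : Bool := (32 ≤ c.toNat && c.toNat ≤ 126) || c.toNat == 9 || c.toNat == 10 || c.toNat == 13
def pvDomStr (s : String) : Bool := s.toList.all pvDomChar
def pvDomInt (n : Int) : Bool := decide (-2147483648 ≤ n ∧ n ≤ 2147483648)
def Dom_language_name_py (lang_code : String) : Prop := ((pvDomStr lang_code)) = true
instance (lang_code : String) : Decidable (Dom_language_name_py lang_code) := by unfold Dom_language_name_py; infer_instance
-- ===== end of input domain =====

-- B replaces A's linear startswith-scan over one 20-entry map by two direct slice-keyed
-- table lookups (lang_code[:3] in a 3-letter map, then lang_code[:2] in a 2-letter map); idiomatic.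

-- ===== PORT A =====
-- A's name_map in insertion order.
def pvNameMapA : List (String × String) :=
  [("fra", "French"), ("eng", "English"), ("spa", "Spanish"),
   ("deu", "German"), ("ita", "Italian"), ("por", "Portuguese"),
   ("jpn", "Japanese"), ("kor", "Korean"), ("zho", "Chinese"),
   ("rus", "Russian"), ("fr", "French"), ("en", "English"),
   ("es", "Spanish"), ("de", "German"), ("it", "Italian"),
   ("pt", "Portuguese"), ("ja", "Japanese"), ("ko", "Korean"),
   ("zh", "Chinese"), ("ru", "Russian")]

-- the 'for prefix, name in name_map.items(): if lang_code.startswith(prefix): return name' loop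
def pvScanA (lang_code : String) : List (String × String) → String
  | [] => "French"
  | (p, n) :: rest => if PySem.Str.startswith lang_code p then n else pvScanA lang_code rest

def language_name_py (lang_code : String) : String :=
  pvScanA lang_code pvNameMapA

-- ===== PORT B =====
def pvNames3 : PySem.Dict String String :=
  PySem.Dict.mk
    [("fra", "French"), ("eng", "English"), ("spa", "Spanish"),
     ("deu", "German"), ("ita", "Italian"), ("por", "Portuguese"),
     ("jpn", "Japanese"), ("kor", "Korean"), ("zho", "Chinese"),
     ("rus", "Russian")]

def pvNames2 : PySem.Dict String String :=
  PySem.Dict.mk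
    [("fr", "French"), ("en", "English"), ("es", "Spanish"),
     ("de", "German"), ("it", "Italian"), ("pt", "Portuguese"),
     ("ja", "Japanese"), ("ko", "Korean"), ("zh", "Chinese"),
     ("ru", "Russian")]

def language_name_py_alt (lang_code : String) : String :=
  match pvNames3.get? (PySem.Str.slice lang_code none (some 3)) with
  | some name => name
  | none =>
    match pvNames2.get? (PySem.Str.slice lang_code none (some 2)) with
    | some name => name
    | none => "French"

-- ===== PRECONDITION & SPEC =====
def Spec_language_name_py (lang_code : String) (out : String) : Prop := out = language_name_py_alt lang_code
instance (lang_code : String) (out : String) : Decidable (Spec_language_name_py lang_code out) := by unfold Spec_language_name_py; infer_instance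

-- ===== CLAIM (what is proved, stated in full; the proofs are below) =====
def Claim_equal_language_name_py : Prop := ∀ (lang_code : String), Dom_language_name_py lang_code → Spec_language_name_py lang_code (language_name_py lang_code)

-- ===== LEMMAS AND PROOFS =====

-- s.startswith(p) holds iff the slice s[:b] equals p, when p has exactly b characters.
theorem pvStartswith_iff_slice (s p : String) (b : Int) (hb : 0 ≤ b)
    (hn : p.toList.length = b.toNat) :
    PySem.Str.startswith s p = true ↔
      PySem.Str.slice s none (some b) = p := by
  rw [PySem.Str.startswith_eq, PySem.Chars.startswith_iff]
  constructor
  · intro h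
    apply String.ext
    rw [PySem.Str.toList_slice, PySem.Chars.slice_eq_listSlice,
      PySem.List.slice_to _ hb]
    rw [List.prefix_iff_eq_take] at h
    rw [hn] at h
    exact h.symm
  · intro h
    have h' := congrArg String.toList h
    rw [PySem.Str.toList_slice, PySem.Chars.slice_eq_listSlice,
      PySem.List.slice_to _ hb] at h'
    rw [List.prefix_iff_eq_take, hn, h']

-- Bool form used to rewrite inside the if-chains.
theorem pvStartswith_eq (s p : String) (b : Int) (hb : 0 ≤ b)
    (hn : p.toList.length = b.toNat) :
    PySem.Str.startswith s p = (p == PySem.Str.slice s none (some b)) := by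
  rw [Bool.eq_iff_iff, beq_iff_eq, pvStartswith_iff_slice s p b hb hn, eq_comm]

-- ===== VERDICT (by name: the statement is the Claim_ definition above) =====
set_option maxHeartbeats 1000000 in
theorem language_name_py_spec : Claim_equal_language_name_py := by
  intro s _
  unfold Spec_language_name_py language_name_py language_name_py_alt pvNameMapA pvNames3 pvNames2
  simp only [pvScanA, PySem.Dict.get?_mk_cons]
  simp only [pvStartswith_eq s "fra" 3 (by norm_num) rfl, pvStartswith_eq s "eng" 3 (by norm_num) rfl, pvStartswith_eq s "spa" 3 (by norm_num) rfl, pvStartswith_eq s "deu" 3 (by norm_num) rfl, pvStartswith_eq s "ita" 3 (by norm_num) rfl, pvStartswith_eq s "por" 3 (by norm_num) rfl, pvStartswith_eq s "jpn" 3 (by norm_num) rfl, pvStartswith_eq s "kor" 3 (by norm_num) rfl, pvStartswith_eq s "zho" 3 (by norm_num) rfl, pvStartswith_eq s "rus" 3 (by norm_num) rfl, pvStartswith_eq s "fr" 2 (by norm_num) rfl, pvStartswith_eq s "en" 2 (by norm_num) rfl, pvStartswith_eq s "es" 2 (by norm_num) rfl, pvStartswith_eq s "de" 2 (by norm_num)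 rfl, pvStartswith_eq s "it" 2 (by norm_num) rfl, pvStartswith_eq s "pt" 2 (by norm_num) rfl, pvStartswith_eq s "ja" 2 (by norm_num) rfl, pvStartswith_eq s "ko" 2 (by norm_num) rfl, pvStartswith_eq s "zh" 2 (by norm_num) rfl, pvStartswith_eq s "ru" 2 (by norm_num) rfl, PySem.Dict.get?]
  simp only [List.find?_nil]
  generalize PySem.Str.slice s none (some 3) = t3
  generalize PySem.Str.slice s none (some 2) = t2
  by_cases h1 : ("fra" == t3) = true
  · simp only [if_pos h1]; try rfl
  simp only [if_neg h1]
  by_cases h2 : ("eng" == t3) = true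
  · simp only [if_pos h2]; try rfl
  simp only [if_neg h2]
  by_cases h3 : ("spa" == t3) = true
  · simp only [if_pos h3]; try rfl
  simp only [if_neg h3]
  by_cases h4 : ("deu" == t3) = true
  · simp only [if_pos h4]; try rfl
  simp only [if_neg h4]
  by_cases h5 : ("ita" == t3) = true
  · simp only [if_pos h5]; try rfl
  simp only [if_neg h5]
  by_cases h6 : ("por" == t3) = true
  · simp only [if_pos h6]; try rfl
  simp only [if_neg h6]
  by_cases h7 : ("jpn" == t3) = true
  · simp only [if_pos h7]; try rfl
  simp only [if_neg h7]
  by_cases h8 : ("kor" == t3) = true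
  · simp only [if_pos h8]; try rfl
  simp only [if_neg h8]
  by_cases h9 : ("zho" == t3) = true
  · simp only [if_pos h9]; try rfl
  simp only [if_neg h9]
  by_cases h10 : ("rus" == t3) = true
  · simp only [if_pos h10]; try rfl
  simp only [if_neg h10]
  by_cases h11 : ("fr" == t2) = true
  · simp only [if_pos h11]; try rfl
  simp only [if_neg h11]
  by_cases h12 : ("en" == t2) = true
  · simp only [if_pos h12]; try rfl
  simp only [if_neg h12]
  by_cases h13 : ("es" == t2) = true
  · simp only [if_pos h13]; try rfl
  simp only [if_neg h13]
  by_cases h14 : ("de" == t2) = true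
  · simp only [if_pos h14]; try rfl
  simp only [if_neg h14]
  by_cases h15 : ("it" == t2) = true
  · simp only [if_pos h15]; try rfl
  simp only [if_neg h15]
  by_cases h16 : ("pt" == t2) = true
  · simp only [if_pos h16]; try rfl
  simp only [if_neg h16]
  by_cases h17 : ("ja" == t2) = true
  · simp only [if_pos h17]; try rfl
  simp only [if_neg h17]
  by_cases h18 : ("ko" == t2) = true
  · simp only [if_pos h18]; try rfl
  simp only [if_neg h18]
  by_cases h19 : ("zh" == t2) = true
  · simp only [if_pos h19]; try rfl
  simp only [if_neg h19]
  by_cases h20 : ("ru" == t2) = true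
  · simp only [if_pos h20]; try rfl
  simp only [if_neg h20]
  rfl
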